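-- pv_equiv track=rewrite | github.com/SinR0str0/TeoriaGraficas | Pagina/brain.py | isRegular
-- ===== SOURCE A (Python) =====
-- def isRegular(GradoI:list, GradoE:list):
--     li = len(GradoI)
--     le = len(GradoE)
--     grado = GradoI[0]
--     for i in range(li):
--         if GradoI[i]!=grado:
--             return 0
--
--     for i in range(le):
--         if GradoE[i]!=grado:
--             return 0
--
--     return 1
-- ===== SOURCE B (Python) =====
-- def isRegular(GradoI: list, GradoE: list):
--     vals = GradoI + GradoE
--     return 1 if min(vals) == max(vals) else 0
-- ===== Notes on version B (the rewrite author's own statement) =====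
-- stated objective: simpler
-- what changed: Replaces A's two early-return comparison loops against the reference GradoI[0] with a single min==max test over the concatenated degree list.
import Mathlib
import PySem

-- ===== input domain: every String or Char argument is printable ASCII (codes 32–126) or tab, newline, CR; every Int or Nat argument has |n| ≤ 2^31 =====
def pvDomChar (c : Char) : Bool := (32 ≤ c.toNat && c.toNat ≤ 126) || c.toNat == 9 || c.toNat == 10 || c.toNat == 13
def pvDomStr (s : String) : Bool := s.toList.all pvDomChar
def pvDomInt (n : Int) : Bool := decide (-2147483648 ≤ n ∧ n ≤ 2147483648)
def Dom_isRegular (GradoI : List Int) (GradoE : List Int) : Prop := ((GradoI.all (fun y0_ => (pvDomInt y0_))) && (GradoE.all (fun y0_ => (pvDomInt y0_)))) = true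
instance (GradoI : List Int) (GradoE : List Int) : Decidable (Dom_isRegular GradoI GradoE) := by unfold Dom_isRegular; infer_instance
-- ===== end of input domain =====

-- B replaces A's two reference-comparison loops with one min==max test over the
-- concatenated list (objective: simpler).

-- ===== PORT A =====
-- early-return loop: some 0 as soon as an element differs from grado, none if the loop finishes
def isRegularLoop (grado : Int) : List Int → Option Int
  | [] => none
  | x :: xs => if x ≠ grado then some 0 else isRegularLoop grado xs

def isRegular (GradoI : List Int) (GradoE : List Int) : Int :=
  match GradoI with
  | [] => 0   -- unreachable under Pre_: Python raises IndexError on GradoI[0]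
  | grado :: _ =>
    match isRegularLoop grado GradoI with
    | some r => r
    | none =>
      match isRegularLoop grado GradoE with
      | some r => r
      | none => 1

-- ===== PORT B =====
def isRegular_alt (GradoI : List Int) (GradoE : List Int) : Int :=
  match GradoI ++ GradoE with
  | [] => 0   -- unreachable under Pre_: Python min([]) raises ValueError
  | v :: vs => if vs.foldl min v = vs.foldl max v then 1 else 0

-- ===== PRECONDITION & SPEC =====
def Pre_isRegular (GradoI : List Int) (GradoE : List Int) : Prop := GradoI ≠ []
instance (GradoI : List Int) (GradoE : List Int) : Decidable (Pre_isRegular GradoI GradoE) := by unfold Pre_isRegular; infer_instance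
def pvWitness_isRegular : List Int × List Int := ([2, 2], [2])

def Spec_isRegular (GradoI : List Int) (GradoE : List Int) (out : Int) : Prop := out = isRegular_alt GradoI GradoE
instance (GradoI : List Int) (GradoE : List Int) (out : Int) : Decidable (Spec_isRegular GradoI GradoE out) := by unfold Spec_isRegular; infer_instance

-- ===== CLAIM (what is proved, stated in full; the proofs are below) =====
def Claim_equal_isRegular : Prop := ∀ (GradoI : List Int) (GradoE : List Int), Dom_isRegular GradoI GradoE → Pre_isRegular GradoI GradoE → Spec_isRegular GradoI GradoE (isRegular GradoI GradoE)

-- ===== LEMMAS AND PROOFS =====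

theorem isRegularLoop_eq_none (g : Int) (xs : List Int) :
    isRegularLoop g xs = none ↔ ∀ x ∈ xs, x = g := by
  induction xs with
  | nil => simp [isRegularLoop]
  | cons x xs ih =>
    by_cases h : x = g <;> simp [isRegularLoop, h, ih]

theorem isRegularLoop_ne_none (g : Int) (xs : List Int) (h : isRegularLoop g xs ≠ none) :
    isRegularLoop g xs = some 0 := by
  induction xs with
  | nil => simp [isRegularLoop] at h
  | cons x xs ih =>
    by_cases hx : x = g
    · simp [isRegularLoop, hx] at h ⊢; exact ih h
    · simp [isRegularLoop, hx]

theorem foldl_min_le_init (v : Int) (vs : List Int) : vs.foldl min v ≤ v := by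
  induction vs generalizing v with
  | nil => simp
  | cons x xs ih => exact le_trans (ih (min v x)) (min_le_left v x)

theorem init_le_foldl_max (v : Int) (vs : List Int) : v ≤ vs.foldl max v := by
  induction vs generalizing v with
  | nil => simp
  | cons x xs ih => exact le_trans (le_max_left v x) (ih (max v x))

theorem foldl_min_le_mem (x : Int) : ∀ (vs : List Int), x ∈ vs → ∀ v : Int, vs.foldl min v ≤ x := by
  intro vs
  induction vs with
  | nil => intro h; simp at h
  | cons y ys ih =>
    intro h v
    rcases List.mem_cons.mp h with rfl | h'
    · exact le_trans (foldl_min_le_init (min v x) ys) (min_le_right v x)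
    · exact ih h' _

theorem mem_le_foldl_max (x : Int) : ∀ (vs : List Int), x ∈ vs → ∀ v : Int, x ≤ vs.foldl max v := by
  intro vs
  induction vs with
  | nil => intro h; simp at h
  | cons y ys ih =>
    intro h v
    rcases List.mem_cons.mp h with rfl | h'
    · exact le_trans (le_max_right v x) (init_le_foldl_max (max v x) ys)
    · exact ih h' _

theorem foldl_min_const (v : Int) (vs : List Int) (h : ∀ x ∈ vs, x = v) : vs.foldl min v = v := by
  induction vs with
  | nil => simp
  | cons x xs ih =>
    have hx : x = v := h x (by simp)
    simp [hx]
    exact ih fun y hy => h y (by simp [hy])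

theorem foldl_max_const (v : Int) (vs : List Int) (h : ∀ x ∈ vs, x = v) : vs.foldl max v = v := by
  induction vs with
  | nil => simp
  | cons x xs ih =>
    have hx : x = v := h x (by simp)
    simp [hx]
    exact ih fun y hy => h y (by simp [hy])

theorem minmax_iff (v : Int) (vs : List Int) :
    (vs.foldl min v = vs.foldl max v) ↔ ∀ x ∈ vs, x = v := by
  constructor
  · intro h x hx
    have h1 : vs.foldl min v ≤ x := foldl_min_le_mem x vs hx v
    have h2 : x ≤ vs.foldl max v := mem_le_foldl_max x vs hx v
    have h3 : vs.foldl min v ≤ v := foldl_min_le_init v vs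
    have h4 : v ≤ vs.foldl max v := init_le_foldl_max v vs
    omega
  · intro h
    rw [foldl_min_const v vs h, foldl_max_const v vs h]

-- ===== VERDICT (by name: the statement is the Claim_ definition above) =====
theorem isRegular_spec : Claim_equal_isRegular := by
  intro GI GE _ hpre
  unfold Spec_isRegular
  match GI with
  | [] => exact absurd rfl hpre
  | g :: tl =>
    unfold isRegular isRegular_alt
    simp only [List.cons_append]
    rw [show isRegularLoop g (g :: tl) = isRegularLoop g tl by simp [isRegularLoop]]
    by_cases h1 : ∀ x ∈ tl, x = g
    · by_cases h2 : ∀ x ∈ GE, x = g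
      · have hall : ∀ x ∈ tl ++ GE, x = g := by
          intro x hx
          rcases List.mem_append.mp hx with h | h
          exacts [h1 x h, h2 x h]
        rw [(isRegularLoop_eq_none g tl).mpr h1, (isRegularLoop_eq_none g GE).mpr h2,
            if_pos ((minmax_iff g (tl ++ GE)).mpr hall)]
      · have hnall : ¬ ∀ x ∈ tl ++ GE, x = g := by
          intro hall
          push_neg at h2
          obtain ⟨x, hx, hne⟩ := h2
          exact hne (hall x (List.mem_append.mpr (Or.inr hx)))
        rw [(isRegularLoop_eq_none g tl).mpr h1,
            isRegularLoop_ne_none g GE (fun hn => h2 ((isRegularLoop_eq_none g GE).mp hn)),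
            if_neg (fun hc => hnall ((minmax_iff g (tl ++ GE)).mp hc))]
    · have hnall : ¬ ∀ x ∈ tl ++ GE, x = g := by
        intro hall
        push_neg at h1
        obtain ⟨x, hx, hne⟩ := h1
        exact hne (hall x (List.mem_append.mpr (Or.inl hx)))
      rw [isRegularLoop_ne_none g tl (fun hn => h1 ((isRegularLoop_eq_none g tl).mp hn)),
          if_neg (fun hc => hnall ((minmax_iff g (tl ++ GE)).mp hc))]
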